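-- pv_equiv track=rewrite | github.com/Kirubhakaran78/OCR | OCR_python/pdf-extraction-project(29-09-2025)/extract_fullcontent_to_excel.py | extract_csv_like_block
-- ===== SOURCE A (Python) =====
-- def extract_csv_like_block(lines):
--     block = []
--     consec = 0
--     blocks = []
--     for ln in lines:
--         if ln.count(",") >= 1:
--             consec += 1
--             block.append(ln)
--         else:
--             if consec >= 2:
--                 blocks.append(block[:])
--             block = []
--             consec = 0
--     if consec >= 2:
--         blocks.append(block)
--     if blocks:
--         largest = max(blocks, key=len)
--         return "\n".join(largest)
--     return None
-- ===== SOURCE B (Python) =====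
-- def extract_csv_like_block(lines):
--     # Phase 1: segment into maximal runs of comma-containing lines (two-pointer scan).
--     runs = []
--     i, n = 0, len(lines)
--     while i < n:
--         if "," in lines[i]:
--             j = i + 1
--             while j < n and "," in lines[j]:
--                 j += 1
--             runs.append(lines[i:j])
--             i = j
--         else:
--             i += 1
--     # Phase 2: keep the first run of length >= 2 that is strictly longer than the best so far.
--     best = None
--     for run in runs:
--         if len(run) >= 2 and (best is None or len(run) > len(best)):
--             best = run
--     return "\n".join(best) if best is not None else None
-- ===== Notes on version B (the rewrite author's own statement) =====
-- stated objective: alternative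
-- what changed: A's single interleaved pass (mutable current-block/counter accumulating a list of qualifying blocks, then max(..., key=len)) is replaced by a two-phase algorithm: a two-pointer index scan that segments the input into maximal comma-runs as slices, then a separate first-longest selection fold with an explicit strict-> comparison.
import Mathlib
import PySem

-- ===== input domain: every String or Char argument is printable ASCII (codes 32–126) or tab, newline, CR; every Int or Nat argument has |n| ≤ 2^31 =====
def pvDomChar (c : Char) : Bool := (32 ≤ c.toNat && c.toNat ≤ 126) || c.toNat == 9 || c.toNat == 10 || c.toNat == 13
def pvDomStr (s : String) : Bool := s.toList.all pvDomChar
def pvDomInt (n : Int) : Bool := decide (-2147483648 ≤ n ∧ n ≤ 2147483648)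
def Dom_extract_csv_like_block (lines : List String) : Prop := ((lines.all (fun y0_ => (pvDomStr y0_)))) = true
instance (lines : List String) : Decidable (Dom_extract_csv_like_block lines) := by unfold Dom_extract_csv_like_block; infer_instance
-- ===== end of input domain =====

-- B re-decomposes A's single interleaved accumulate-and-collect pass into two phases (a two-pointer
-- segmentation into maximal comma-runs, then a first-longest selection fold); same cost, alternative structure.

-- ===== PORT A =====
-- one fold step = one iteration of A's for-loop over (block, consec, blocks)
def aStep (s : List String × Int × List (List String)) (ln : String) :
    List String × Int × List (List String) :=
  if 1 ≤ PySem.Str.count ln "," then (s.1 ++ [ln], s.2.1 + 1, s.2.2)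
  else (([] : List String), 0, if s.2.1 ≥ 2 then s.2.2 ++ [s.1] else s.2.2)

def extract_csv_like_block (lines : List String) : Option String :=
  let st := lines.foldl aStep (([] : List String), (0 : Int), ([] : List (List String)))
  let blocks := if st.2.1 ≥ 2 then st.2.2 ++ [st.1] else st.2.2
  if blocks.isEmpty then none
  else
    match PySem.List.max? blocks (fun b => PySem.List.len b) with  -- max(blocks, key=len): first maximal
    | some largest => some (PySem.Str.join "\n" largest)
    | none => none  -- unreachable: blocks nonempty

-- ===== PORT B =====
def bHasComma (s : String) : Bool := PySem.Str.isIn "," s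

-- inner while loop: advance j while j < n and lines[j] contains a comma (j stays ≤ n, in range)
def bFindEnd (lines : List String) (n j : Nat) : Nat :=
  if j < n ∧ bHasComma (lines.getD j "") then bFindEnd lines n (j + 1) else j
termination_by n - j
decreasing_by omega

theorem bFindEnd_ge (lines : List String) (n j : Nat) : j ≤ bFindEnd lines n j := by
  rw [bFindEnd]
  split
  · have h2 := bFindEnd_ge lines n (j + 1)
    omega
  · exact Nat.le_refl j
termination_by n - j
decreasing_by omega

-- outer while loop of phase 1: collect the maximal comma-runs as slices lines[i:j]
def bSeg (lines : List String) (n i : Nat) : List (List String) :=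
  if h : i < n then
    if bHasComma (lines.getD i "") then
      PySem.List.slice lines (some (i : Int)) (some ((bFindEnd lines n (i + 1)) : Int))
        :: bSeg lines n (bFindEnd lines n (i + 1))
    else bSeg lines n (i + 1)
  else []
termination_by n - i
decreasing_by
  · have : i + 1 ≤ bFindEnd lines n (i + 1) := bFindEnd_ge lines n (i + 1)
    omega
  · omega

-- phase 2: keep the first run of length ≥ 2 strictly longer than the best so far
def bSelStep (best : Option (List String)) (run : List String) : Option (List String) :=
  match best with
  | none => if 2 ≤ run.length then some run else none
  | some b => if 2 ≤ run.length ∧ b.length < run.length then some run else some b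

def extract_csv_like_block_alt (lines : List String) : Option String :=
  let runs := bSeg lines lines.length 0
  match runs.foldl bSelStep none with
  | some best => some (PySem.Str.join "\n" best)
  | none => none

-- ===== PRECONDITION & SPEC =====
def Spec_extract_csv_like_block (lines : List String) (out : Option String) : Prop := out = extract_csv_like_block_alt lines
instance (lines : List String) (out : Option String) : Decidable (Spec_extract_csv_like_block lines out) := by unfold Spec_extract_csv_like_block; infer_instance

-- ===== CLAIM (what is proved, stated in full; the proofs are below) =====
def Claim_equal_extract_csv_like_block : Prop := ∀ (lines : List String), Dom_extract_csv_like_block lines → Spec_extract_csv_like_block lines (extract_csv_like_block lines)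

-- ===== LEMMAS AND PROOFS =====

-- the two comma tests agree: count(",") >= 1  ↔  "," in s
-- acc only grows along count.go
theorem countGo_ge (sub : List Char) (fuel : Nat) (l : List Char) (acc : Nat) :
    acc ≤ PySem.Chars.count.go sub fuel l acc := by
  induction fuel generalizing l acc with
  | zero => simp [PySem.Chars.count.go]
  | succ f ih =>
    cases l with
    | nil => simp [PySem.Chars.count.go]
    | cons h t =>
      rw [PySem.Chars.count.go]
      split
      · exact le_trans (Nat.le_succ acc) (ih _ _)
      · exact ih _ _

-- count.go adds nothing exactly when sub occurs nowhere
theorem countGo_eq_iff (sub : List Char) (hsub : sub ≠ []) :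
    ∀ (fuel : Nat) (l : List Char) (acc : Nat), l.length ≤ fuel →
    (PySem.Chars.count.go sub fuel l acc = acc ↔ ¬ sub <:+: l) := by
  intro fuel
  induction fuel with
  | zero =>
    intro l acc hl
    have hln : l = [] := List.eq_nil_of_length_eq_zero (by omega)
    subst hln
    simp [PySem.Chars.count.go, hsub]
  | succ f ih =>
    intro l acc hl
    cases l with
    | nil => simp [PySem.Chars.count.go, hsub]
    | cons x t =>
      rw [PySem.Chars.count.go, List.infix_cons_iff]
      split
      · rename_i hp
        constructor
        · intro hgo
          have := countGo_ge sub f (List.drop sub.length (x :: t)) (acc + 1)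
          omega
        · intro hni
          exact absurd (Or.inl (List.isPrefixOf_iff_prefix.mp hp)) hni
      · rename_i hp
        rw [ih t acc (by simpa using hl)]
        have : ¬ sub <+: x :: t := fun h => hp (List.isPrefixOf_iff_prefix.mpr h)
        tauto

-- the two comma tests agree: count(",") >= 1  ↔  "," in s
theorem hasComma_eq (s : String) : (1 ≤ PySem.Str.count s ",") ↔ bHasComma s = true := by
  have hts : (",".toList : List Char) = [','] := by decide
  rw [bHasComma, PySem.Str.isIn_eq, PySem.Chars.isIn_iff_infix, hts, PySem.Str.count_eq, hts,
    PySem.Chars.count]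
  rw [if_neg (by simp)]
  have hiff := countGo_eq_iff [','] (by simp) s.toList.length s.toList 0 (le_refl _)
  constructor
  · intro h1
    by_contra hni
    rw [← hiff] at hni
    omega
  · intro hin
    have : ¬ (PySem.Chars.count.go [','] s.toList.length s.toList 0 = 0) := by
      rw [hiff]; tauto
    omega

-- reference shape of the segmentation: maximal nonempty comma-runs, structurally
def runsAux (ls : List String) (cur : List String) : List (List String) :=
  match ls with
  | [] => if cur = [] then [] else [cur]
  | l :: t => if bHasComma l then runsAux t (cur ++ [l])
              else (if cur = [] then [] else [cur]) ++ runsAux t []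

theorem runsAux_span (ls cur : List String) (h : cur ≠ []) :
    runsAux ls cur = (cur ++ ls.takeWhile bHasComma) :: runsAux (ls.dropWhile bHasComma) [] := by
  induction ls generalizing cur with
  | nil => simp [runsAux, h]
  | cons l t ih =>
    by_cases hc : bHasComma l = true
    · rw [runsAux, if_pos hc, ih (cur ++ [l]) (by simp), List.takeWhile_cons_of_pos hc,
        List.dropWhile_cons_of_pos hc]
      simp
    · rw [runsAux, if_neg hc, if_neg h, List.takeWhile_cons_of_neg (by simp [hc]),
        List.dropWhile_cons_of_neg (by simp [hc])]
      simp [runsAux, hc]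

theorem bFindEnd_spec (lines : List String) (n j : Nat) (hn : n = lines.length) (hj : j ≤ n) :
    bFindEnd lines n j = j + ((lines.drop j).takeWhile bHasComma).length := by
  rw [bFindEnd]
  by_cases hj2 : j < n
  · have hjl : j < lines.length := by omega
    rw [List.drop_eq_getElem_cons hjl, List.getD_eq_getElem lines "" hjl]
    by_cases hc : bHasComma lines[j] = true
    · rw [if_pos ⟨hj2, hc⟩, bFindEnd_spec lines n (j + 1) hn (by omega),
        List.takeWhile_cons_of_pos hc]
      simp; omega
    · rw [if_neg (by simp [hc]), List.takeWhile_cons_of_neg (by simp [hc])]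
      simp
  · have : lines.drop j = [] := by
      apply List.drop_eq_nil_of_le; omega
    rw [if_neg (by simp [hj2]), this]
    simp
termination_by n - j
decreasing_by omega

theorem bSeg_spec (lines : List String) (n i : Nat) (hn : n = lines.length) :
    bSeg lines n i = runsAux (lines.drop i) [] := by
  rw [bSeg]
  by_cases hi : i < n
  · have hil : i < lines.length := by omega
    rw [dif_pos hi, List.drop_eq_getElem_cons hil, List.getD_eq_getElem lines "" hil]
    by_cases hc : bHasComma lines[i] = true
    · rw [if_pos hc]
      have hj := bFindEnd_spec lines n (i + 1) hn (by omega)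
      have hjge := bFindEnd_ge lines n (i + 1)
      set t := (lines.drop (i + 1)).takeWhile bHasComma with ht
      have hslice : PySem.List.slice lines (some (i : Int)) (some ((bFindEnd lines n (i + 1)) : Int))
          = lines[i] :: t := by
        rw [PySem.List.slice_natCast, List.drop_eq_getElem_cons hil, hj]
        have : i + 1 + t.length - i = t.length + 1 := by omega
        rw [this, List.take_succ_cons]
        congr 1
        have hpre : t <+: lines.drop (i + 1) := List.takeWhile_prefix bHasComma
        exact ((List.prefix_iff_eq_take.mp hpre)).symm
      have hdrop : lines.drop (bFindEnd lines n (i + 1)) = (lines.drop (i + 1)).dropWhile bHasComma := by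
        rw [hj, ← List.drop_drop]
        conv_lhs => rw [show lines.drop (i+1) = t ++ (lines.drop (i+1)).dropWhile bHasComma from
          (List.takeWhile_append_dropWhile).symm]
        exact List.drop_left
      rw [hslice, bSeg_spec lines n (bFindEnd lines n (i + 1)) hn, hdrop,
        runsAux, if_pos hc]
      simp only [List.nil_append]
      rw [runsAux_span _ [lines[i]] (by simp)]
      simp [ht]
    · rw [if_neg hc, bSeg_spec lines n (i + 1) hn, runsAux, if_neg hc]
      simp
  · rw [dif_neg hi, List.drop_eq_nil_of_le (by omega)]
    simp [runsAux]
termination_by n - i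
decreasing_by
  · have := bFindEnd_ge lines n (i + 1); omega
  · omega

-- A's fold (plus trailing flush) collects exactly the length-≥2 runs
theorem aFold_spec (lines : List String) (block : List String) (consec : Int)
    (blocks : List (List String)) (hc : consec = (block.length : Int)) :
    (let st := lines.foldl aStep (block, consec, blocks)
     if st.2.1 ≥ 2 then st.2.2 ++ [st.1] else st.2.2)
      = blocks ++ (runsAux lines block).filter (fun r => 2 ≤ r.length) := by
  induction lines generalizing block consec blocks with
  | nil =>
    simp only [List.foldl_nil, runsAux]
    by_cases hb : block = ([] : List String)
    · subst hb
      simp at hc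
      simp [hc]
    · rw [if_neg hb]
      by_cases h2 : (2 : Int) ≤ consec
      · rw [if_pos h2]
        simp only [List.filter_cons, List.filter_nil]
        rw [if_pos (by simp; omega)]
      · rw [if_neg (by omega)]
        simp only [List.filter_cons, List.filter_nil]
        rw [if_neg (by simp; omega)]
        simp
  | cons l t ih =>
    simp only [List.foldl_cons, runsAux, aStep]
    by_cases hc2 : bHasComma l = true
    · rw [if_pos ((hasComma_eq l).mpr hc2), if_pos hc2]
      exact ih (block ++ [l]) (consec + 1) blocks (by simp [hc])
    · have hcnt : ¬ (1 ≤ PySem.Str.count l ",") := fun h => hc2 ((hasComma_eq l).mp h)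
      rw [if_neg hcnt, if_neg hc2]
      rw [ih [] 0 _ (by simp)]
      rw [List.filter_append]
      by_cases hb : block = ([] : List String)
      · subst hb
        simp at hc
        rw [if_neg (by omega), if_pos rfl]
        simp
      · rw [if_neg hb]
        by_cases h2 : (2 : Int) ≤ consec
        · rw [if_pos h2]
          simp only [List.filter_cons, List.filter_nil]
          rw [if_pos (by simp; omega)]
          simp
        · rw [if_neg (by omega)]
          simp only [List.filter_cons, List.filter_nil]
          rw [if_neg (by simp; omega)]
          simp

-- B's selection fold over all runs = Python max-by-len fold over the length-≥2 runs
theorem bSel_spec (runs : List (List String)) (best : Option (List String)) :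
    runs.foldl bSelStep best
      = (runs.filter (fun r => 2 ≤ r.length)).foldl
          (fun acc x => match acc with
            | none => some x
            | some m => if PySem.List.len m < PySem.List.len x then some x else some m) best := by
  induction runs generalizing best with
  | nil => simp
  | cons r t ih =>
    simp only [List.foldl_cons, List.filter_cons]
    by_cases h2 : 2 ≤ r.length
    · have hstep : bSelStep best r = (match best with
          | none => some r
          | some m => if PySem.List.len m < PySem.List.len r then some r else some m) := by
        cases best with
        | none => simp [bSelStep, h2]
        | some b =>
          simp only [bSelStep, PySem.List.len]
          by_cases hlt : b.length < r.length
          · rw [if_pos ⟨h2, hlt⟩, if_pos (by exact_mod_cast hlt)]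
          · rw [if_neg (by tauto), if_neg (by exact_mod_cast hlt)]
      rw [if_pos (by simpa using h2), List.foldl_cons, ih (bSelStep best r), hstep]
    · have hstep : bSelStep best r = best := by
        cases best with
        | none => simp [bSelStep, h2]
        | some b => simp only [bSelStep]; rw [if_neg (by tauto)]
      rw [if_neg (by simpa using h2), hstep, ih best]

-- ===== VERDICT (by name: the statement is the Claim_ definition above) =====
theorem extract_csv_like_block_spec : Claim_equal_extract_csv_like_block := by
  intro lines _
  unfold Spec_extract_csv_like_block extract_csv_like_block extract_csv_like_block_alt
  have hseg : bSeg lines lines.length 0 = runsAux lines [] := by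
    simpa using bSeg_spec lines lines.length 0 rfl
  have hA := aFold_spec lines [] 0 [] (by simp)
  simp only [List.nil_append] at hA
  simp only [hseg, bSel_spec]
  rw [hA]
  generalize (runsAux lines []).filter (fun r => 2 ≤ r.length) = B
  cases B with
  | nil => simp
  | cons b bs =>
    simp only [List.isEmpty_cons]
    rw [if_neg (by simp), PySem.List.max?]
    congr 1
    apply List.foldl_ext
    intro acc x _
    cases acc <;> rfl
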